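-- pv_equiv track=rewrite | github.com/xuezhou1998/my442project | xuw86hw2F.py | is_solved_identical
-- ===== SOURCE A (Python) =====
-- def is_solved_identical(Disk):
--     counter=0
--     for i in reversed(Disk):
--         if i==True:
--             counter+=1
--         else:
--             break
--
--     if counter==Disk.count(True):
--         return True
--     else:
--         return False
-- ===== SOURCE B (Python) =====
-- def is_solved_identical(Disk):
--     seen_true = False
--     for x in Disk:
--         if x == True:
--             seen_true = True
--         elif seen_true:
--             return False
--     return True
-- ===== Notes on version B (the rewrite author's own statement) =====
-- stated objective: simpler
-- what changed: Replaced the reversed-traversal trailing-run count plus Disk.count(True) comparison by a single forward pass with a seen_true flag that returns False on the first non-True after a True, short-circuiting early.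
import Mathlib
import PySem

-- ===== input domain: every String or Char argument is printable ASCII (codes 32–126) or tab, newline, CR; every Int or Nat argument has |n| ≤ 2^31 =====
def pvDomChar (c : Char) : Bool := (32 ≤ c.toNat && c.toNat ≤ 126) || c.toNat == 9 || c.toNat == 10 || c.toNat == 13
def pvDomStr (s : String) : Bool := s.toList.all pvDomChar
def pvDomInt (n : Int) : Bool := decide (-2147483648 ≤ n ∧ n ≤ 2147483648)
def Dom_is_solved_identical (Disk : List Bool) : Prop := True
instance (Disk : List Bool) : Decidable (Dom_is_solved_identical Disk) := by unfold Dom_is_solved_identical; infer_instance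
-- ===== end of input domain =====

-- B replaces A's reversed trailing-run count + Disk.count(True) comparison by a single
-- forward pass with a seen_true flag (simpler; early exit on the first violation).


-- ===== PORT A =====
-- the 'for i in reversed(Disk): if i==True: counter+=1 else: break' loop, carrying counter
def pvALoop : List Bool → Int → Int
  | [], counter => counter
  | i :: rest, counter => if i == true then pvALoop rest (counter + 1) else counter

def is_solved_identical (Disk : List Bool) : Bool :=
  let counter := pvALoop Disk.reverse 0
  if counter == (Disk.count true : Int) then true else false

-- ===== PORT B =====
-- the forward loop carrying seen_true, returning False on a non-True after a True
def pvBGo : List Bool → Bool → Bool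
  | [], _ => true
  | x :: xs, seen_true => if x == true then pvBGo xs true
                          else if seen_true then false else pvBGo xs seen_true

def is_solved_identical_alt (Disk : List Bool) : Bool := pvBGo Disk false

-- ===== PRECONDITION & SPEC =====
def Spec_is_solved_identical (Disk : List Bool) (out : Bool) : Prop := out = is_solved_identical_alt Disk
instance (Disk : List Bool) (out : Bool) : Decidable (Spec_is_solved_identical Disk out) := by unfold Spec_is_solved_identical; infer_instance

-- ===== CLAIM (what is proved, stated in full; the proofs are below) =====
def Claim_equal_is_solved_identical : Prop := ∀ (Disk : List Bool), Dom_is_solved_identical Disk → Spec_is_solved_identical Disk (is_solved_identical Disk)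

-- ===== LEMMAS AND PROOFS =====

-- appending a False at the end of the scanned (reversed) list never changes the trailing-run count
theorem pvALoop_append_false (r : List Bool) (c : Int) :
    pvALoop (r ++ [false]) c = pvALoop r c := by
  induction r generalizing c with
  | nil => simp [pvALoop]
  | cons x xs ih => cases x <;> simp [pvALoop, ih]

-- with a True appended, the loop result equals c + count + 1 exactly when the list is all True
theorem pvALoop_append_true (r : List Bool) (c : Int) :
    (pvALoop (r ++ [true]) c = c + (r.count true : Int) + 1) ↔ r.all (fun x => x) := by
  induction r generalizing c with
  | nil => simp [pvALoop]
  | cons x xs ih =>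
    cases x with
    | false =>
      simp only [pvALoop, List.cons_append, Bool.false_eq_true, if_false]
      have : (0 : Int) ≤ (xs.count true : Int) := Int.natCast_nonneg _
      constructor
      · intro h; exfalso; simp [List.count_cons] at h; omega
      · intro h; simp at h
    | true =>
      have h := ih (c + 1)
      simp only [pvALoop, List.cons_append, List.count_cons, List.all_cons, beq_self_eq_true,
        if_true]
      rw [show c + ((xs.count true + 1 : Nat) : Int) + 1 = (c + 1) + (xs.count true : Int) + 1 by
        push_cast; ring]
      simpa using h

-- after a True has been seen, B's loop accepts exactly the all-True lists
theorem pvBGo_true (xs : List Bool) : pvBGo xs true = xs.all (fun x => x) := by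
  induction xs with
  | nil => simp [pvBGo]
  | cons x xs ih => cases x <;> simp [pvBGo, ih]

theorem main_equiv (Disk : List Bool) : is_solved_identical Disk = is_solved_identical_alt Disk := by
  induction Disk with
  | nil => decide
  | cons x xs ih =>
    cases x with
    | false =>
      simp only [is_solved_identical, is_solved_identical_alt, List.reverse_cons,
        pvALoop_append_false, List.count_cons, pvBGo] at *
      simpa using ih
    | true =>
      have hb : is_solved_identical_alt (true :: xs) = xs.all (fun x => x) := by
        simp [is_solved_identical_alt, pvBGo, pvBGo_true]
      have h := pvALoop_append_true xs.reverse 0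
      rw [List.count_reverse, List.all_reverse] at h
      rw [hb]
      simp only [is_solved_identical, List.reverse_cons, List.count_cons, beq_self_eq_true,
        if_true]
      by_cases hall : xs.all (fun x => x) = true
      · have hv := h.mpr hall
        rw [hall, if_pos]
        rw [beq_iff_eq]
        push_cast at hv ⊢
        omega
      · rw [Bool.not_eq_true] at hall
        rw [hall, if_neg]
        intro hc
        rw [beq_iff_eq] at hc
        have : (xs.all fun x => x) = true := h.mp (by push_cast at hc ⊢; omega)
        simp [hall] at this

-- ===== VERDICT (by name: the statement is the Claim_ definition above) =====
theorem is_solved_identical_spec : Claim_equal_is_solved_identical := by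
  intro Disk _
  unfold Spec_is_solved_identical
  exact main_equiv Disk
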